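-- pv_equiv track=rewrite | github.com/alexandraback/datacollection | solutions_5631989306621952_1/Python/xeina/A.py | create_word
-- ===== SOURCE A (Python) =====
-- def create_word(starting_string):
--     new_string = starting_string[0]
--     starting_string = starting_string[1:]
--     for char in starting_string:
--         if char < new_string[0]:
--             new_string = new_string+char
--         else:
--             new_string = char + new_string
--     return new_string
-- ===== SOURCE B (Python) =====
-- def prefixes(chars):
--     return [chars[:i] for i in range(len(chars))]
--
-- def create_word(starting_string):
--     chars = list(starting_string)
--     pcs = list(zip(prefixes(chars), chars))
--     highs = [c for p, c in pcs if all(d <= c for d in p)]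
--     rest = [c for p, c in pcs if not all(d <= c for d in p)]
--     return ''.join(reversed(highs)) + ''.join(rest)
-- ===== Notes on version B (the rewrite author's own statement) =====
-- stated objective: alternative
-- what changed: B drops A's stateful string-building loop entirely: it pairs every character with its whole prefix and selects each character by the stateless predicate that every earlier character compares at most equal to it (these record highs go in front, reversed; the rest keep their order), joining once at the end.
import Mathlib
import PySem

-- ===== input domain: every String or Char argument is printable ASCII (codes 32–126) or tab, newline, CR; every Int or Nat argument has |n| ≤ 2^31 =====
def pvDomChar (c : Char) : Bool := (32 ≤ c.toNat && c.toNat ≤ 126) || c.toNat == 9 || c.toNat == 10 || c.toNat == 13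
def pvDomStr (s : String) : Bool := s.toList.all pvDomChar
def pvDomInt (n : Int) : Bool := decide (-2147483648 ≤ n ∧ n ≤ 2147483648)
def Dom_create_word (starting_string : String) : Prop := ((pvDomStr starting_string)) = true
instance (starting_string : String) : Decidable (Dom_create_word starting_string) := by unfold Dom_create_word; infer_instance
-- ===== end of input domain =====

-- B replaces A's stateful prepend/append string-building loop by a stateless
-- characterisation: a char goes in front iff all earlier chars are <= it
-- (objective: alternative, same asymptotic cost).

-- ===== PORT A =====
-- A's loop state is the string built so far (never empty); it appends char when
-- char < its first character, else prepends.
def create_word (starting_string : String) : String :=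
  match starting_string.toList with
  | [] => ""   -- unreachable: Python A raises IndexError on "", excluded by Pre_
  | c :: rest =>
    String.ofList (rest.foldl
      (fun ns ch => if ch < ns.headD ' ' then ns ++ [ch] else ch :: ns) [c])

-- ===== PORT B =====
-- Source B's helper: prefixes(chars) = [chars[:i] for i in range(len(chars))]
def prefixesL (l : List Char) : List (List Char) :=
  (List.range l.length).map (fun i => l.take i)

-- B: pair each char with its prefix; highs = chars dominating their prefix.
def create_word_alt (starting_string : String) : String :=
  let chars := starting_string.toList
  let pcs := (prefixesL chars).zip chars
  let highs := (pcs.filter (fun q => q.1.all (fun d => d ≤ q.2))).map (·.2)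
  let rest := (pcs.filter (fun q => !(q.1.all (fun d => d ≤ q.2)))).map (·.2)
  String.ofList (highs.reverse ++ rest)

-- ===== PRECONDITION & SPEC =====
-- A evaluates starting_string[0], which raises IndexError on the empty string.
def Pre_create_word (starting_string : String) : Prop := starting_string ≠ ""
instance (starting_string : String) : Decidable (Pre_create_word starting_string) := by unfold Pre_create_word; infer_instance
def pvWitness_create_word : String := "ba"

def Spec_create_word (starting_string : String) (out : String) : Prop := out = create_word_alt starting_string
instance (starting_string : String) (out : String) : Decidable (Spec_create_word starting_string out) := by unfold Spec_create_word; infer_instance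

-- ===== CLAIM (what is proved, stated in full; the proofs are below) =====
def Claim_equal_create_word : Prop := ∀ (starting_string : String), Dom_create_word starting_string → Pre_create_word starting_string → Spec_create_word starting_string (create_word starting_string)

-- ===== LEMMAS AND PROOFS =====

-- proof-only helper: split m l = (record highs of l w.r.t. running max m, the rest)
def splitCW (m : Char) : List Char → List Char × List Char
  | [] => ([], [])
  | c :: l =>
    if m ≤ c then ((c :: (splitCW c l).1), (splitCW c l).2)
    else ((splitCW m l).1, (c :: (splitCW m l).2))

theorem prefixesL_cons (c : Char) (l : List Char) :
    prefixesL (c :: l) = [] :: (prefixesL l).map (fun p => c :: p) := by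
  simp [prefixesL, List.range_succ_eq_map, Function.comp_def]

-- A-side invariant
theorem A_inv : ∀ (l : List Char) (m : Char) (hs rs : List Char),
    l.foldl (fun ns ch => if ch < ns.headD ' ' then ns ++ [ch] else ch :: ns)
      ((hs ++ [m]).reverse ++ rs)
    = ((hs ++ [m]) ++ (splitCW m l).1).reverse ++ (rs ++ (splitCW m l).2) := by
  intro l
  induction l with
  | nil => intro m hs rs; simp [splitCW]
  | cons c l ih =>
    intro m hs rs
    simp only [List.foldl_cons]
    by_cases h : m ≤ c
    · rw [if_neg (by simp [not_lt.mpr h])]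
      have : (c : Char) :: ((hs ++ [m]).reverse ++ rs)
           = (((hs ++ [m]) ++ [c]).reverse) ++ rs := by simp
      rw [this]
      have := ih c (hs ++ [m]) rs
      simp only [List.append_assoc] at this ⊢
      rw [this]
      simp [splitCW, h]
    · rw [if_pos (by simpa using not_le.mp h)]
      have : ((hs ++ [m]).reverse ++ rs) ++ [c] = (hs ++ [m]).reverse ++ (rs ++ [c]) := by
        simp
      rw [this, ih m hs (rs ++ [c])]
      simp [splitCW, h]

-- B-side invariant: filtering the prefix-zipped suffix, with seen prefix
-- abstracted by g and its running max m
theorem B_inv : ∀ (l : List Char) (m : Char) (g : List Char → List Char),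
    (∀ (x : Char) (p : List Char),
      (g p).all (fun d => d ≤ x) = (decide (m ≤ x) && p.all (fun d => d ≤ x))) →
    ((((prefixesL l).map g).zip l).filter (fun q => q.1.all (fun d => d ≤ q.2))).map (·.2)
      = (splitCW m l).1
    ∧ ((((prefixesL l).map g).zip l).filter (fun q => !(q.1.all (fun d => d ≤ q.2)))).map (·.2)
      = (splitCW m l).2 := by
  intro l
  induction l with
  | nil => intro m g _; simp [prefixesL, splitCW]
  | cons c l ih =>
    intro m g hg
    rw [prefixesL_cons]
    simp only [List.map_cons, List.zip_cons_cons, List.map_map]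
    have hcond : (g []).all (fun d => d ≤ c) = decide (m ≤ c) := by
      simpa using hg c []
    by_cases h : m ≤ c
    · have ih' := ih c (fun p => g (c :: p)) (by
        intro x p
        rw [hg x (c :: p)]
        simp only [List.all_cons]
        by_cases hx : m ≤ x
        · by_cases hcx : c ≤ x <;> simp [hx, hcx]
        · have : ¬ c ≤ x := fun hcx => hx (le_trans h hcx)
          simp [hx, this])
      constructor
      · rw [List.filter_cons]
        simp only [hcond, h, decide_true, if_pos]
        simp only [List.map_cons, splitCW, if_pos h]
        congr 1
        simpa [Function.comp_def] using ih'.1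
      · rw [List.filter_cons]
        simp only [hcond, h, decide_true, Bool.not_true, Bool.false_eq_true]
        simp only [splitCW, if_pos h]
        simpa [Function.comp_def] using ih'.2
    · have ih' := ih m (fun p => g (c :: p)) (by
        intro x p
        rw [hg x (c :: p)]
        simp only [List.all_cons]
        by_cases hx : m ≤ x
        · have hcx : c ≤ x := le_trans (le_of_lt (not_le.mp h)) hx
          simp [hx, hcx]
        · simp [hx])
      constructor
      · rw [List.filter_cons]
        simp only [hcond, h, decide_false, Bool.false_eq_true]
        simp only [splitCW, if_neg h]
        simpa [Function.comp_def] using ih'.1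
      · rw [List.filter_cons]
        simp only [hcond, h, decide_false, Bool.not_false, if_pos]
        simp only [List.map_cons, splitCW, if_neg h]
        congr 1
        simpa [Function.comp_def] using ih'.2

-- ===== VERDICT (by name: the statement is the Claim_ definition above) =====
theorem create_word_spec : Claim_equal_create_word := by
  intro s _ hpre
  unfold Spec_create_word create_word create_word_alt
  cases h : s.toList with
  | nil =>
    exact absurd (by simpa using congrArg String.ofList h) hpre
  | cons c rest =>
    have hA := A_inv rest c [] []
    simp only [List.nil_append, List.append_nil, List.reverse_cons, List.reverse_nil,
      List.singleton_append] at hA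
    have hB := B_inv rest c (fun p => c :: p) (by intro x p; simp)
    dsimp only
    rw [prefixesL_cons]
    simp only [List.zip_cons_cons, List.filter_cons, List.all_nil, Bool.not_true, reduceIte,
      List.map_cons]
    simp only [Bool.false_eq_true, if_false]
    rw [hB.1, hB.2, hA]
    simp
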